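-- pv_equiv track=rewrite | github.com/juho-creator/Calendar2Onenote | v1.0/main.py | FirstDayOfMonth
-- ===== SOURCE A (Python) =====
-- DaysInWeek={'Sun': 0, 'Mon': 1, 'Tues': 2, 'Wed': 3, 'Thurs': 4,'Fri': 5,'Sat': 6}
--
-- def get_key(val):
--     for key, value in DaysInWeek.items():
--         if val == value:
--             return key
--
--     return "key doesn't exist"
--
-- def IsLeapYear(year):
--     return(((year%4==0)&(year%100!=0)) or (year%400==0))
--
-- def FirstDayOfMonth(year,month):
--
--     weekday=DaysInWeek['Mon']
--
--     for i in range(1900,year):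
--         weekday=(weekday+365)%7
--         if (IsLeapYear(i)):
--             weekday=(weekday+1)%7
--
--     for i in range(1,month):
--         weekday=(weekday+MonthDays(year,i))%7
--
--     if weekday==7:
--         weekday=0
--
--     return get_key(weekday)
--
-- def MonthDays(year,month):
--     L=[4,6,9,11]
--     if(month==2):
--         if(IsLeapYear(year)):
--             return 29
--         return 28
--
--     elif(month in L):
--         return 30
--
--     else:
--         return 31
-- ===== SOURCE B (Python) =====
-- # B: O(1) closed form -- day counts from the epoch by floor-division leap
-- # arithmetic instead of A's per-year and per-month loops.
--
-- _DAY_NAMES = ['Sun', 'Mon', 'Tues', 'Wed', 'Thurs', 'Fri', 'Sat']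
--
-- # (month, how many days short of 31 it is)
-- _SHORT_MONTHS = ((2, 3), (4, 1), (6, 1), (9, 1), (11, 1))
--
--
-- def _is_leap(year):
--     return (year % 4 == 0 and year % 100 != 0) or year % 400 == 0
--
--
-- def _leaps(y):
--     # number of leap years in [1, y]
--     return y // 4 - y // 100 + y // 400
--
--
-- def FirstDayOfMonth(year, month):
--     # Days from the epoch (Monday, 1900-01-01) to the first of the month.
--     n = max(year - 1900, 0)                 # whole years elapsed
--     days = 365 * n + _leaps(1899 + n) - _leaps(1899)
--     k = max(month - 1, 0)                   # whole months elapsed this year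
--     days += 31 * k                          # every month at the default 31 days,
--     days -= sum(d for m, d in _SHORT_MONTHS if m <= k)   # minus the short months' deficit
--     if k >= 2 and _is_leap(year):           # February had 29 days
--         days += 1
--     return _DAY_NAMES[(1 + days) % 7]
-- ===== Notes on version B (the rewrite author's own statement) =====
-- stated objective: faster
-- what changed: Replaces A's loop over every year since 1900 and its per-month loop by closed-form day counts: a floor-division leap-year count for the elapsed years and 31-per-month minus the short months' deficit for the elapsed months, making the computation O(1).
import Mathlib
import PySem

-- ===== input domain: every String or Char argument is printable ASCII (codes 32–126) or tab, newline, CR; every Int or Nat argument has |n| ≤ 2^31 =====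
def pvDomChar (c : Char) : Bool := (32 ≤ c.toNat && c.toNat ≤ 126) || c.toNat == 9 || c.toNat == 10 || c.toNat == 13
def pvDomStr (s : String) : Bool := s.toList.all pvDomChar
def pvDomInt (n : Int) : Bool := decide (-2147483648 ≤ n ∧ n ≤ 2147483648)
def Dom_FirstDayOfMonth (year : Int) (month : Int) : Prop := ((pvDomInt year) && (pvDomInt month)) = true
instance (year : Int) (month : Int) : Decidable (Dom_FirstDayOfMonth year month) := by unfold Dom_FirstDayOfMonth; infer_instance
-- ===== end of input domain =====

-- B replaces A's per-year and per-month loops by closed-form day counts from the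
-- epoch (floor-division leap count; 31 per month minus the short months' deficit)
-- (objective: faster, O(1) vs O(year)).

-- ===== PORT A =====
def DaysInWeek : PySem.Dict String Int :=
  PySem.Dict.ofList [("Sun", 0), ("Mon", 1), ("Tues", 2), ("Wed", 3), ("Thurs", 4), ("Fri", 5), ("Sat", 6)]

def get_key_loop (val : Int) : List (String × Int) → String
  | [] => "key doesn't exist"
  | (k, v) :: rest => if val == v then k else get_key_loop val rest

def get_key (val : Int) : String := get_key_loop val DaysInWeek.items

def IsLeapYear (year : Int) : Bool :=
  ((PySem.Int.mod year 4 == 0) && (PySem.Int.mod year 100 != 0)) || (PySem.Int.mod year 400 == 0)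

def MonthDays (year : Int) (month : Int) : Int :=
  if month == 2 then (if IsLeapYear year then 29 else 28)
  else if ([4, 6, 9, 11] : List Int).contains month then 30
  else 31

def FirstDayOfMonth (year : Int) (month : Int) : String :=
  let weekday : Int := PySem.Dict.getD DaysInWeek "Mon" 0   -- key present; default unused
  let weekday := (PySem.List.pyRange 1900 year 1).foldl
    (fun w i =>
      let w := PySem.Int.mod (w + 365) 7
      if IsLeapYear i then PySem.Int.mod (w + 1) 7 else w) weekday
  let weekday := (PySem.List.pyRange 1 month 1).foldl
    (fun w i => PySem.Int.mod (w + MonthDays year i) 7) weekday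
  let weekday := if weekday == 7 then (0 : Int) else weekday
  get_key weekday

-- ===== PORT B =====
def dayNames : List String := ["Sun", "Mon", "Tues", "Wed", "Thurs", "Fri", "Sat"]

-- (month, how many days short of 31 it is)
def shortMonths : List (Int × Int) := [(2, 3), (4, 1), (6, 1), (9, 1), (11, 1)]

def isLeapB (year : Int) : Bool :=
  ((PySem.Int.mod year 4 == 0) && (PySem.Int.mod year 100 != 0)) || (PySem.Int.mod year 400 == 0)

-- number of leap years in [1, y]
def leaps (y : Int) : Int :=
  PySem.Int.floordiv y 4 - PySem.Int.floordiv y 100 + PySem.Int.floordiv y 400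

def FirstDayOfMonth_alt (year : Int) (month : Int) : String :=
  let n : Int := max (year - 1900) 0                                   -- whole years elapsed
  let days : Int := 365 * n + leaps (1899 + n) - leaps 1899
  let k : Int := max (month - 1) 0                                     -- whole months elapsed this year
  let days := days + 31 * k                                            -- every month at the default 31 days,
  let days := days - ((shortMonths.filter (fun p => p.1 ≤ k)).map Prod.snd).sum  -- minus the short months' deficit
  let days := if k ≥ 2 && isLeapB year then days + 1 else days         -- February had 29 days
  PySem.List.pyGetD dayNames (PySem.Int.mod (1 + days) 7) "Sun"

-- ===== PRECONDITION & SPEC =====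
def Spec_FirstDayOfMonth (year : Int) (month : Int) (out : String) : Prop := out = FirstDayOfMonth_alt year month
instance (year : Int) (month : Int) (out : String) : Decidable (Spec_FirstDayOfMonth year month out) := by unfold Spec_FirstDayOfMonth; infer_instance

-- ===== CLAIM (what is proved, stated in full; the proofs are below) =====
def Claim_equal_FirstDayOfMonth : Prop := ∀ (year : Int) (month : Int), Dom_FirstDayOfMonth year month → Spec_FirstDayOfMonth year month (FirstDayOfMonth year month)

-- ===== LEMMAS AND PROOFS =====

theorem mod7_compose (a b : Int) :
    PySem.Int.mod (PySem.Int.mod a 7 + b) 7 = PySem.Int.mod (a + b) 7 := by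
  have h : ∀ x : Int, PySem.Int.mod x 7 = x % 7 := fun x => PySem.Int.mod_eq_emod_of_pos (by norm_num)
  simp only [h]
  omega

theorem leap_delta (y : Int) (hy : 0 < y) :
    leaps y - leaps (y - 1) = (if IsLeapYear y then 1 else 0) := by
  have hf : ∀ (a b : Int), 0 < b → PySem.Int.floordiv a b = a / b :=
    fun a b hb => PySem.Int.floordiv_eq_ediv_of_pos hb
  have hm : ∀ (a b : Int), 0 < b → PySem.Int.mod a b = a % b :=
    fun a b hb => PySem.Int.mod_eq_emod_of_pos hb
  unfold leaps IsLeapYear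
  rw [hf _ 4 (by norm_num), hf _ 100 (by norm_num), hf _ 400 (by norm_num),
    hf _ 4 (by norm_num), hf _ 100 (by norm_num), hf _ 400 (by norm_num),
    hm _ 4 (by norm_num), hm _ 100 (by norm_num), hm _ 400 (by norm_num)]
  split_ifs with h
  · simp only [Bool.or_eq_true, Bool.and_eq_true, beq_iff_eq, bne_iff_ne, ne_eq] at h
    omega
  · simp only [Bool.or_eq_true, Bool.and_eq_true, beq_iff_eq, bne_iff_ne, ne_eq] at h
    push_neg at h
    omega

def yStep (w i : Int) : Int :=
  let w := PySem.Int.mod (w + 365) 7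
  if IsLeapYear i then PySem.Int.mod (w + 1) 7 else w

theorem foldlA_eq (a b init : Int) :
    (PySem.List.pyRange a b 1).foldl
      (fun w i =>
        let w := PySem.Int.mod (w + 365) 7
        if IsLeapYear i then PySem.Int.mod (w + 1) 7 else w) init =
    (PySem.List.pyRange a b 1).foldl yStep init := rfl

theorem yStep_mod (M i : Int) (hi : 0 < i) :
    yStep (PySem.Int.mod M 7) i = PySem.Int.mod (M + 365 + (leaps i - leaps (i - 1))) 7 := by
  unfold yStep
  rw [leap_delta i hi]
  by_cases hL : IsLeapYear i
  · simp only [hL, if_true, mod7_compose]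
  · simp only [hL, Bool.false_eq_true, if_false, mod7_compose, add_zero]

theorem year_loop (n : Nat) :
    (PySem.List.pyRange 1900 (1900 + (n : Int)) 1).foldl yStep 1 =
      PySem.Int.mod (1 + 365 * (n : Int) + leaps (1899 + n) - leaps 1899) 7 := by
  induction n with
  | zero =>
    rw [show ((0 : Nat) : Int) = 0 from rfl]
    norm_num [PySem.List.pyRange_one_eq_nil]
  | succ n ih =>
    have h1 : (1900 : Int) ≤ 1900 + (n : Int) := by omega
    have hc : (1900 + ((n + 1 : Nat) : Int)) = (1900 + (n : Int)) + 1 := by push_cast; ring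
    rw [hc, PySem.List.pyRange_one_succ_right h1, List.foldl_append]
    simp only [List.foldl_cons, List.foldl_nil, ih]
    rw [yStep_mod _ _ (by omega)]
    have e1 : (1900 : Int) + (n : Int) - 1 = 1899 + (n : Int) := by ring
    have e2 : (1899 : Int) + ((n + 1 : Nat) : Int) = 1900 + (n : Int) := by push_cast; ring
    rw [e1, e2]
    congr 1
    push_cast
    ring

-- the year-side closed form of B (definitionally B's `days` before the month part)
def daysY (year : Int) : Int :=
  365 * max (year - 1900) 0 + leaps (1899 + max (year - 1900) 0) - leaps 1899

theorem yearfold_eq (year : Int) :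
    (PySem.List.pyRange 1900 year 1).foldl yStep 1 = PySem.Int.mod (1 + daysY year) 7 := by
  by_cases hy : year ≤ 1900
  · rw [PySem.List.pyRange_one_eq_nil hy]
    have hmx : max (year - 1900) 0 = 0 := by omega
    unfold daysY
    rw [hmx]
    decide
  · push_neg at hy
    have hmx : max (year - 1900) 0 = year - 1900 := by omega
    have hn : year = 1900 + ((year - 1900).toNat : Int) := by omega
    have hn' : (((year - 1900).toNat : Nat) : Int) = year - 1900 := by omega
    rw [hn, year_loop]
    unfold daysY
    rw [hn']
    simp only [show (1900 : Int) + (year - 1900) - 1900 = year - 1900 from by ring, hmx]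
    congr 1
    ring

def sumMonths (year : Int) : Nat → Int
  | 0 => 0
  | n + 1 => sumMonths year n + MonthDays year (1 + n)

theorem month_loop (year M : Int) (n : Nat) :
    (PySem.List.pyRange 1 (1 + (n : Int)) 1).foldl
        (fun w i => PySem.Int.mod (w + MonthDays year i) 7) (PySem.Int.mod M 7) =
      PySem.Int.mod (M + sumMonths year n) 7 := by
  induction n with
  | zero =>
    simp only [Nat.cast_zero, add_zero]
    rw [PySem.List.pyRange_one_eq_nil le_rfl]
    simp [sumMonths]
  | succ n ih =>
    have h1 : (1 : Int) ≤ 1 + (n : Int) := by omega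
    have hc : (1 + ((n + 1 : Nat) : Int)) = (1 + (n : Int)) + 1 := by push_cast; ring
    rw [hc, PySem.List.pyRange_one_succ_right h1, List.foldl_append]
    simp only [List.foldl_cons, List.foldl_nil, ih, mod7_compose, sumMonths]
    congr 1
    ring

-- the short-month deficit sum of B, and its if-form
def Ssum (k : Int) : Int := ((shortMonths.filter (fun p => p.1 ≤ k)).map Prod.snd).sum

theorem Ssum_eq (k : Int) :
    Ssum k = (if 2 ≤ k then 3 else 0) + (if 4 ≤ k then 1 else 0) + (if 6 ≤ k then 1 else 0)
      + (if 9 ≤ k then 1 else 0) + (if 11 ≤ k then 1 else 0) := by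
  unfold Ssum shortMonths
  simp only [List.filter_cons, List.filter_nil, decide_eq_true_eq]
  split_ifs <;> simp_all

-- B's month-side day count at k elapsed months
def daysM (year k : Int) : Int :=
  if k ≥ 2 && isLeapB year then 31 * k - Ssum k + 1 else 31 * k - Ssum k

theorem isLeapB_eq : isLeapB = IsLeapYear := rfl

theorem monthDays_big (year : Int) (i : Int) (hi : 13 ≤ i) : MonthDays year i = 31 := by
  unfold MonthDays
  rw [if_neg (show ¬ ((i == 2) = true) by simp; omega),
      if_neg (show ¬ ((([4, 6, 9, 11] : List Int).contains i) = true) by simp; omega)]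

theorem sumMonths_eq (year : Int) (m : Nat) :
    sumMonths year m = daysM year (m : Int) := by
  induction m with
  | zero =>
    show (0 : Int) = daysM year 0
    unfold daysM
    rw [Ssum_eq]
    norm_num
  | succ k ih =>
    by_cases hk : k ≤ 11
    · interval_cases k <;> by_cases hL : IsLeapYear year <;>
        simp [sumMonths, MonthDays, daysM, Ssum_eq, isLeapB_eq, hL]
    · push_neg at hk
      have hMD : MonthDays year (1 + (k : Int)) = 31 := monthDays_big year _ (by omega)
      show sumMonths year k + MonthDays year (1 + k) = daysM year ((k + 1 : Nat) : Int)
      rw [ih]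
      push_cast
      rw [hMD]
      unfold daysM
      rw [Ssum_eq, Ssum_eq]
      have h2a : ((k : Int) ≥ 2) = True := by simp; omega
      have h2b : ((k : Int) + 1 ≥ 2) = True := by simp; omega
      simp only [h2a, h2b, true_and, ge_iff_le]
      by_cases hL : isLeapB year <;> simp only [hL, Bool.and_true, Bool.and_false,
        if_true, if_false, Bool.true_and, Bool.false_and, Bool.false_eq_true] <;>
        split_ifs <;> omega

theorem get_key_mod (k : Int) (h0 : 0 ≤ k) (h7 : k < 7) :
    get_key k = PySem.List.pyGetD dayNames k "Sun" := by
  interval_cases k <;> decide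

theorem mod7_ne7 (M : Int) : (PySem.Int.mod M 7 == 7) = false := by
  have := PySem.Int.mod_lt M (by norm_num : (0 : Int) < 7)
  simp only [beq_eq_false_iff_ne, ne_eq]
  omega

theorem final_step (M : Int) :
    get_key (if PySem.Int.mod M 7 == 7 then (0 : Int) else PySem.Int.mod M 7) =
      PySem.List.pyGetD dayNames (PySem.Int.mod M 7) "Sun" := by
  rw [mod7_ne7, if_neg (by simp)]
  exact get_key_mod _ (PySem.Int.mod_nonneg _ (by norm_num)) (PySem.Int.mod_lt _ (by norm_num))

theorem pyGetD_mod_congr (X Y : Int) (h : X = Y) :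
    PySem.List.pyGetD dayNames (PySem.Int.mod X 7) "Sun"
      = PySem.List.pyGetD dayNames (PySem.Int.mod Y 7) "Sun" := by
  rw [h]

theorem main_eq (year month : Int) : FirstDayOfMonth year month = FirstDayOfMonth_alt year month := by
  show (let weekday := PySem.Dict.getD DaysInWeek "Mon" 0
        let weekday := (PySem.List.pyRange 1900 year 1).foldl
          (fun w i =>
            let w := PySem.Int.mod (w + 365) 7
            if IsLeapYear i then PySem.Int.mod (w + 1) 7 else w) weekday
        let weekday := (PySem.List.pyRange 1 month 1).foldl
          (fun w i => PySem.Int.mod (w + MonthDays year i) 7) weekday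
        let weekday := if weekday == 7 then (0 : Int) else weekday
        get_key weekday) =
       (let D := daysY year + 31 * max (month - 1) 0 - Ssum (max (month - 1) 0)
        PySem.List.pyGetD dayNames
          (PySem.Int.mod (1 + (if max (month - 1) 0 ≥ 2 && isLeapB year then D + 1 else D)) 7) "Sun")
  have h0 : PySem.Dict.getD DaysInWeek "Mon" 0 = 1 := by decide
  simp only [h0, foldlA_eq, yearfold_eq]
  by_cases hm : month ≤ 1
  · rw [PySem.List.pyRange_one_eq_nil hm, List.foldl_nil, final_step]
    have hmx : max (month - 1) 0 = 0 := by omega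
    rw [hmx]
    have hS : Ssum 0 = 0 := by rw [Ssum_eq]; norm_num
    rw [hS]
    have hc : (decide ((0 : Int) ≥ 2) && isLeapB year) = false := by simp
    rw [hc]
    simp only [Bool.false_eq_true, if_false]
    apply pyGetD_mod_congr
    ring
  · push_neg at hm
    have hn : month = 1 + (((month - 1).toNat : Nat) : Int) := by omega
    rw [hn, month_loop, final_step, sumMonths_eq]
    have e : (1 : Int) + (((month - 1).toNat : Nat) : Int) - 1 = (((month - 1).toNat : Nat) : Int) := by ring
    rw [e]
    have emax : max ((((month - 1).toNat : Nat) : Int)) 0 = (((month - 1).toNat : Nat) : Int) := by omega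
    rw [emax]
    unfold daysM
    split_ifs <;> apply pyGetD_mod_congr <;> ring

-- ===== VERDICT (by name: the statement is the Claim_ definition above) =====
theorem FirstDayOfMonth_spec : Claim_equal_FirstDayOfMonth := by
  intro year month _
  unfold Spec_FirstDayOfMonth
  show FirstDayOfMonth year month = FirstDayOfMonth_alt year month
  rw [main_eq]
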